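-- pv_equiv track=rewrite | github.com/ElKju/chronoGram-scheduling-app | P2/OneOnOne/Schedules/views.py | valid_schedules
-- ===== SOURCE A (Python) =====
-- def valid_schedules(suggestion_lst, weight_lst, num_invitee):
--     valid_suggestion_lst = []
--     valid_weight_lst =  []
--     for i in range(len(suggestion_lst)):
--         if len(suggestion_lst[i]) == num_invitee:
--             valid_suggestion_lst.append(suggestion_lst[i])
--             valid_weight_lst.append(weight_lst[i])
--     combined_lst = list(zip(valid_suggestion_lst, valid_weight_lst))
--     unique_dicts = set()
--     unique_lst = [(d, t) for d, t in combined_lst if (d_tuple := tuple(sorted(d.items()))) not in unique_dicts and not unique_dicts.add(d_tuple)]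
--     return unique_lst
-- ===== SOURCE B (Python) =====
-- def valid_schedules(suggestion_lst, weight_lst, num_invitee):
--     # Offline two-pass plan instead of A's online seen-set dedup:
--     # (1) enumerate the schedules that have weights and the right size,
--     # (2) build a first-occurrence index map in one reversed overwrite pass
--     #     (iterating in reverse, the LAST write for a key is its FIRST index),
--     # (3) keep exactly the entries sitting at their key's first index.
--     def key(d):
--         return tuple(sorted(d.items()))
--     kept = [(i, d) for i, d in enumerate(suggestion_lst[:len(weight_lst)])
--             if len(d) == num_invitee]
--     first = {key(d): i for i, d in reversed(kept)}
--     return [(d, weight_lst[i]) for i, d in kept if first[key(d)] == i]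
-- ===== Notes on version B (the rewrite author's own statement) =====
-- stated objective: alternative
-- what changed: A's online dedup (index loop into two parallel filtered lists, zip, then a comprehension testing and mutating a seen-set) is replaced by an offline two-pass plan: enumerate-and-filter the weighted schedules, build a first-occurrence index map in one reversed overwrite dict-comprehension pass, and keep exactly the entries sitting at their key's first index.
import Mathlib
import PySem

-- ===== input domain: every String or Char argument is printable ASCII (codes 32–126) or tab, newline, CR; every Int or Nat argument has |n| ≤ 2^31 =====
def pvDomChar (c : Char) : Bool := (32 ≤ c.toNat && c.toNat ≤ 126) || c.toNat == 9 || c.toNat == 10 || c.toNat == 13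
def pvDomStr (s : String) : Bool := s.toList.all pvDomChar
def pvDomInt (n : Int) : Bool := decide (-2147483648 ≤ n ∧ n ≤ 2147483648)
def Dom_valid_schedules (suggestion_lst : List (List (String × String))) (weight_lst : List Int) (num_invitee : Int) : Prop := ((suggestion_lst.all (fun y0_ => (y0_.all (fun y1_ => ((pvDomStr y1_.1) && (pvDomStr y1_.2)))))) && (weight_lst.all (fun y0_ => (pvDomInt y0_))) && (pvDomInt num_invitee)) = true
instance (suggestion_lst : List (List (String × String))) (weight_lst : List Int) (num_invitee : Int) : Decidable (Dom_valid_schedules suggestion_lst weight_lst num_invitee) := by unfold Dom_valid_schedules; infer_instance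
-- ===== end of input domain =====

-- B replaces A's online seen-set dedup (index-loop filter into two parallel lists, zip,
-- walrus-set comprehension) by an offline two-pass plan: enumerate-and-filter, build a
-- first-occurrence index map in one reversed overwrite pass, then keep exactly the entries
-- sitting at their key's first index; objective: alternative (same order of cost).


-- ===== PORT A =====
-- tuple(sorted(d.items())): Python sorts the (key, value) string pairs lexicographically;
-- PySem.List.sorted2 with the two components as keys is exact for that tuple sort.
def valid_schedules (suggestion_lst : List (List (String × String))) (weight_lst : List Int) (num_invitee : Int) : List ((List (String × String)) × Int) :=
  -- for i in range(len(suggestion_lst)): if len(...)==num_invitee: append to both lists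
  let fil := (PySem.List.pyRange 0 (suggestion_lst.length : Int) 1).foldl
    (fun (acc : List (List (String × String)) × List Int) i =>
      if ((PySem.List.pyGetD suggestion_lst i []).length : Int) = num_invitee then
        (acc.1 ++ [PySem.List.pyGetD suggestion_lst i []], acc.2 ++ [PySem.List.pyGetD weight_lst i 0])
      else acc)
    ([], [])
  let combined_lst := fil.1.zip fil.2
  -- comprehension with the walrus-mutated seen set, as a fold carrying (unique_dicts, unique_lst)
  let res := combined_lst.foldl
    (fun (st : PySem.Set (List (String × String)) × List ((List (String × String)) × Int)) p =>
      let d_tuple := PySem.List.sorted2 p.1 Prod.fst Prod.snd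
      if st.1.contains d_tuple then st else (PySem.Set.add st.1 d_tuple, st.2 ++ [p]))
    (PySem.Set.empty, [])
  res.2

-- ===== PORT B =====
-- Source B's key(d) = tuple(sorted(d.items()))
def vsKey (d : List (String × String)) : List (String × String) :=
  PySem.List.sorted2 d Prod.fst Prod.snd

-- first-occurrence map of Source B: fold the reversed list with overwriting inserts
def vsFirst (q : List (Int × (List (String × String)))) :
    PySem.Dict (List (String × String)) Int :=
  q.reverse.foldl (fun m p => m.insert (vsKey p.2) p.1) PySem.Dict.empty

def valid_schedules_alt (suggestion_lst : List (List (String × String))) (weight_lst : List Int) (num_invitee : Int) : List ((List (String × String)) × Int) :=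
  -- kept = [(i, d) for i, d in enumerate(suggestion_lst[:len(weight_lst)]) if len(d) == num_invitee]
  let kept := (PySem.List.enumerate (PySem.List.slice suggestion_lst none (some (weight_lst.length : Int))) 0).filter
    (fun p => decide ((p.2.length : Int) = num_invitee))
  -- first = {key(d): i for i, d in reversed(kept)}   (dict comprehension: overwriting inserts)
  let first := vsFirst kept
  -- [(d, weight_lst[i]) for i, d in kept if first[key(d)] == i]; first[key(d)] always hits
  -- (every key of kept is a key of first), so getD with an unused default is exact
  (kept.filter (fun p => decide (first.getD (vsKey p.2) (-1) = p.1))).map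
    (fun p => (p.2, PySem.List.pyGetD weight_lst p.1 0))

-- ===== PRECONDITION & SPEC =====
-- Pre_ excludes exactly the inputs where A raises IndexError on weight_lst[i]: a schedule with
-- num_invitee entries sitting at an index ≥ len(weight_lst).
def Pre_valid_schedules (suggestion_lst : List (List (String × String))) (weight_lst : List Int) (num_invitee : Int) : Prop :=
  ∀ d ∈ suggestion_lst.drop weight_lst.length, (d.length : Int) ≠ num_invitee
instance (suggestion_lst : List (List (String × String))) (weight_lst : List Int) (num_invitee : Int) : Decidable (Pre_valid_schedules suggestion_lst weight_lst num_invitee) := by unfold Pre_valid_schedules; infer_instance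
def pvWitness_valid_schedules : (List (List (String × String))) × List Int × Int := ([[("a", "b")], [("a", "b")], []], [5, 7, 9], 1)

def Spec_valid_schedules (suggestion_lst : List (List (String × String))) (weight_lst : List Int) (num_invitee : Int) (out : List ((List (String × String)) × Int)) : Prop := out = valid_schedules_alt suggestion_lst weight_lst num_invitee
instance (suggestion_lst : List (List (String × String))) (weight_lst : List Int) (num_invitee : Int) (out : List ((List (String × String)) × Int)) : Decidable (Spec_valid_schedules suggestion_lst weight_lst num_invitee out) := by unfold Spec_valid_schedules; infer_instance

-- ===== CLAIM (what is proved, stated in full; the proofs are below) =====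
def Claim_equal_valid_schedules : Prop := ∀ (suggestion_lst : List (List (String × String))) (weight_lst : List Int) (num_invitee : Int), Dom_valid_schedules suggestion_lst weight_lst num_invitee → Pre_valid_schedules suggestion_lst weight_lst num_invitee → Spec_valid_schedules suggestion_lst weight_lst num_invitee (valid_schedules suggestion_lst weight_lst num_invitee)

-- ===== LEMMAS AND PROOFS =====

-- dedup skeleton of A's seen-set fold with an explicit key list (proof-only helper)
def goDedup (pairs : List ((List (String × String)) × Int))
    (seen : List (List (String × String))) : List ((List (String × String)) × Int) :=
  match pairs with
  | [] => []
  | p :: rest =>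
    let k := PySem.List.sorted2 p.1 Prod.fst Prod.snd
    if k ∈ seen then goDedup rest seen
    else [p] ++ goDedup rest (seen ++ [k])

-- A's seen-set fold keeps the same elements as the recursive dedup with an explicit key list,
-- provided set membership agrees with list membership.
lemma fold_set_eq_goDedup (c : List ((List (String × String)) × Int)) :
    ∀ (seen : PySem.Set (List (String × String))) (ks : List (List (String × String)))
      (acc : List ((List (String × String)) × Int)),
      (∀ k, seen.contains k = decide (k ∈ ks)) →
      (c.foldl
        (fun (st : PySem.Set (List (String × String)) × List ((List (String × String)) × Int)) p =>
          let d_tuple := PySem.List.sorted2 p.1 Prod.fst Prod.snd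
          if st.1.contains d_tuple then st else (PySem.Set.add st.1 d_tuple, st.2 ++ [p]))
        (seen, acc)).2
      = acc ++ goDedup c ks := by
  induction c with
  | nil => intro seen ks acc _; simp [goDedup]
  | cons p rest ih =>
    intro seen ks acc H
    simp only [List.foldl_cons, goDedup]
    by_cases hk : PySem.List.sorted2 p.1 Prod.fst Prod.snd ∈ ks
    · have hc : seen.contains (PySem.List.sorted2 p.1 Prod.fst Prod.snd) = true := by
        rw [H]; simpa
      simp only [hc, hk, if_pos]
      exact ih seen ks acc H
    · have hc : seen.contains (PySem.List.sorted2 p.1 Prod.fst Prod.snd) = false := by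
        rw [H]; simpa
      simp only [hc, Bool.false_eq_true, hk, if_neg, not_false_iff]
      have H' : ∀ k, (PySem.Set.add seen (PySem.List.sorted2 p.1 Prod.fst Prod.snd)).contains k
          = decide (k ∈ ks ++ [PySem.List.sorted2 p.1 Prod.fst Prod.snd]) := by
        intro k
        have hH := H k
        simp only [PySem.Set.contains] at hH ⊢
        simp only [List.contains_eq_mem] at hH
        simp [PySem.Set.mem_add, List.mem_append]
        rw [hH]
      rw [ih _ _ _ H']
      simp

-- A's index-loop filter produces exactly the matching (schedule, weight) pairs of the zip,
-- as two parallel lists, provided no matching schedule sits past the end of weight_lst.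
lemma filter_phase_eq (suggestion_lst : List (List (String × String))) (weight_lst : List Int)
    (num_invitee : Int)
    (hpre : Pre_valid_schedules suggestion_lst weight_lst num_invitee) :
    ((PySem.List.pyRange 0 (suggestion_lst.length : Int) 1).foldl
      (fun (acc : List (List (String × String)) × List Int) i =>
        if ((PySem.List.pyGetD suggestion_lst i []).length : Int) = num_invitee then
          (acc.1 ++ [PySem.List.pyGetD suggestion_lst i []], acc.2 ++ [PySem.List.pyGetD weight_lst i 0])
        else acc)
      ([], []))
    = (((suggestion_lst.zip weight_lst).filter
          (fun p => decide ((p.1.length : Int) = num_invitee))).map Prod.fst,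
       ((suggestion_lst.zip weight_lst).filter
          (fun p => decide ((p.1.length : Int) = num_invitee))).map Prod.snd) := by
  have hm : ((suggestion_lst.zip weight_lst).length : Int) ≤ (suggestion_lst.length : Int) := by
    simp [List.length_zip]
  rw [PySem.List.pyRange_one_append 0 ((suggestion_lst.zip weight_lst).length : Int)
        (suggestion_lst.length : Int) (by positivity) hm,
      List.foldl_append]
  -- the tail of the range (indices ≥ len(weight_lst)) never fires, by Pre_
  rw [show ∀ init, (PySem.List.pyRange ((suggestion_lst.zip weight_lst).length : Int)
        (suggestion_lst.length : Int) 1).foldl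
      (fun (acc : List (List (String × String)) × List Int) i =>
        if ((PySem.List.pyGetD suggestion_lst i []).length : Int) = num_invitee then
          (acc.1 ++ [PySem.List.pyGetD suggestion_lst i []], acc.2 ++ [PySem.List.pyGetD weight_lst i 0])
        else acc) init = init from ?_]
  · -- the head of the range is the loop over the zipped pairs
    rw [PySem.List.foldl_congr_mem _ _
        (fun (acc : List (List (String × String)) × List Int) i =>
          (fun (a : List (List (String × String)) × List Int)
               (p : (List (String × String)) × Int) =>
            if ((p.1.length : Int) = num_invitee) then (a.1 ++ [p.1], a.2 ++ [p.2]) else a)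
          acc (PySem.List.pyGetD (suggestion_lst.zip weight_lst) i ([], 0))) _ ?_]
    · rw [show ((suggestion_lst.zip weight_lst).length : Int)
            = PySem.List.len (suggestion_lst.zip weight_lst) from by simp [PySem.List.len],
          PySem.List.foldl_pyRange_zero_pyGetD (suggestion_lst.zip weight_lst) ([], 0)
            (fun (a : List (List (String × String)) × List Int)
                 (p : (List (String × String)) × Int) =>
              if ((p.1.length : Int) = num_invitee) then (a.1 ++ [p.1], a.2 ++ [p.2]) else a)
            ([], []),
          PySem.List.foldl_ite_eq_foldl_filter
            (fun (p : (List (String × String)) × Int) => ((p.1.length : Int) = num_invitee))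
            (fun (a : List (List (String × String)) × List Int)
                 (p : (List (String × String)) × Int) => (a.1 ++ [p.1], a.2 ++ [p.2]))
            (suggestion_lst.zip weight_lst) ([], []),
          PySem.List.foldl_prod_mk
            (f := fun (a : List (List (String × String)))
                      (p : (List (String × String)) × Int) => a ++ [p.1])
            (g := fun (a : List Int) (p : (List (String × String)) × Int) => a ++ [p.2])]
      rw [PySem.List.foldl_append_singleton_eq_map
            (fun (p : (List (String × String)) × Int) => p.1) _ [],
          PySem.List.foldl_append_singleton_eq_map
            (fun (p : (List (String × String)) × Int) => p.2) _ []]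
      simp
    · intro acc i hi
      rw [PySem.List.mem_pyRange_one] at hi
      have h1 : i < ((suggestion_lst.zip weight_lst).length : Int) := hi.2
      have h2 : i < (suggestion_lst.length : Int) := lt_of_lt_of_le h1 hm
      have h3 : i < (weight_lst.length : Int) := by
        have := h1; simp [List.length_zip] at this; omega
      have hz : PySem.List.pyGetD (suggestion_lst.zip weight_lst) i ([], 0)
          = (suggestion_lst[i.toNat]'(by omega),
             weight_lst[i.toNat]'(by omega)) := by
        rw [PySem.List.pyGetD_eq_getElem _ _ hi.1 h1, List.getElem_zip]
      rw [PySem.List.pyGetD_eq_getElem _ _ hi.1 h2,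
          PySem.List.pyGetD_eq_getElem _ _ hi.1 h3]
      simp [hz]
  · -- tail segment: every index there points past weight_lst, so the test is false
    intro init
    rw [PySem.List.foldl_congr_mem _ _ (fun acc _ => acc) _ ?_, PySem.List.foldl_ignore]
    intro acc i hi
    rw [PySem.List.mem_pyRange_one] at hi
    have h0 : (0 : Int) ≤ i := le_trans (by positivity) hi.1
    have h2 : i < (suggestion_lst.length : Int) := hi.2
    have hw : weight_lst.length ≤ i.toNat := by
      have := hi.1; simp [List.length_zip] at this; omega
    have hmem : suggestion_lst[i.toNat]'(by omega) ∈ suggestion_lst.drop weight_lst.length := by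
      have hgd : (suggestion_lst.drop weight_lst.length)[i.toNat - weight_lst.length]'(by
            simp [List.length_drop]; omega) = suggestion_lst[i.toNat]'(by omega) := by
        rw [List.getElem_drop]; congr 1; omega
      rw [← hgd]; exact List.getElem_mem _
    have hne := hpre _ hmem
    rw [PySem.List.pyGetD_eq_getElem _ _ h0 h2, if_neg hne]

-- order-preserving dedup by a key function, with no seen structure: keep the head, strip
-- later elements sharing its key, recurse (proof-only helper)
def dedupNS {a : Type} (kf : a -> List (String × String)) : List a -> List a
  | [] => []
  | p :: rest => p :: dedupNS kf (rest.filter (fun x => decide (kf x ≠ kf p)))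
  termination_by l => l.length
  decreasing_by
    simp only [List.length_unattach, List.length_cons, Nat.lt_succ_iff]
    exact le_trans (List.length_filter_le _ _) (by simp)

lemma dedupNS_nil {a : Type} (kf : a -> List (String × String)) : dedupNS kf [] = [] := by
  rw [dedupNS]

lemma dedupNS_cons {a : Type} (kf : a -> List (String × String)) (p : a) (rest : List a) :
    dedupNS kf (p :: rest) = p :: dedupNS kf (rest.filter (fun x => decide (kf x ≠ kf p))) := by
  rw [dedupNS]

-- the seen-set dedup is dedupNS after erasing already-seen keys
lemma goDedup_eq_dedupNS (c : List ((List (String × String)) × Int)) :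
    ∀ ks : List (List (String × String)),
      goDedup c ks
        = dedupNS (fun p => PySem.List.sorted2 p.1 Prod.fst Prod.snd)
            (c.filter (fun p => decide (PySem.List.sorted2 p.1 Prod.fst Prod.snd ∉ ks))) := by
  induction c with
  | nil => intro ks; simp [goDedup, dedupNS_nil]
  | cons p rest ih =>
    intro ks
    by_cases hk : PySem.List.sorted2 p.1 Prod.fst Prod.snd ∈ ks
    · simp [goDedup, hk, ih]
    · simp only [goDedup, List.filter_cons, hk, not_false_iff, decide_true, if_neg, if_pos,
        dedupNS_cons, ih, List.singleton_append]
      congr 2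
      rw [List.filter_filter]
      apply List.filter_congr
      intro x _
      simp [List.mem_append, not_or, and_comm]

lemma vsFirst_cons (p : Int × (List (String × String)))
    (q : List (Int × (List (String × String)))) (k : List (String × String)) (df : Int) :
    (vsFirst (p :: q)).getD k df
      = if k = vsKey p.2 then p.1 else (vsFirst q).getD k df := by
  simp only [vsFirst, List.reverse_cons, List.foldl_append, List.foldl_cons, List.foldl_nil]
  rw [PySem.Dict.getD_insert]

-- dropping all elements of one key does not change the map at other keys
lemma vsFirst_filter_ne (q : List (Int × (List (String × String))))
    (c k : List (String × String)) (df : Int) (hkc : k ≠ c) :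
    (vsFirst (q.filter (fun x => decide (vsKey x.2 ≠ c)))).getD k df
      = (vsFirst q).getD k df := by
  induction q with
  | nil => rfl
  | cons p q ih =>
    by_cases hp : vsKey p.2 = c
    · rw [List.filter_cons_of_neg (by simpa using hp), ih, vsFirst_cons,
        if_neg (by rw [hp]; exact hkc)]
    · rw [List.filter_cons_of_pos (by simpa using hp), vsFirst_cons, vsFirst_cons]
      by_cases hk : k = vsKey p.2
      · simp [hk]
      · rw [if_neg hk, if_neg hk, ih]

-- on an index-increasing list, "sits at its key's first index" selects exactly dedupNS
lemma filter_first_eq_dedupNS :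
    ∀ (n : Nat) (q : List (Int × (List (String × String)))), q.length ≤ n →
      q.Pairwise (fun a b => a.1 < b.1) →
      q.filter (fun p => decide ((vsFirst q).getD (vsKey p.2) (-1) = p.1))
        = dedupNS (fun p => vsKey p.2) q := by
  intro n
  induction n with
  | zero =>
    intro q hq _
    rw [Nat.le_zero, List.length_eq_zero_iff] at hq
    subst hq
    simp [dedupNS_nil]
  | succ n ih =>
    intro q hq hp
    cases q with
    | nil => simp [dedupNS_nil]
    | cons p q' =>
      have hq1 : q'.length ≤ n := by simpa using hq
      have hhead : (vsFirst (p :: q')).getD (vsKey p.2) (-1) = p.1 := by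
        rw [vsFirst_cons, if_pos rfl]
      rw [List.filter_cons_of_pos (by simpa using hhead)]
      have hstep : q'.filter (fun x => decide ((vsFirst (p :: q')).getD (vsKey x.2) (-1) = x.1))
          = (q'.filter (fun x => decide (vsKey x.2 ≠ vsKey p.2))).filter
              (fun x => decide ((vsFirst q').getD (vsKey x.2) (-1) = x.1)) := by
        rw [List.filter_filter]
        apply List.filter_congr
        intro x hx
        by_cases he : vsKey x.2 = vsKey p.2
        · have hlt : p.1 < x.1 := (List.pairwise_cons.mp hp).1 x hx
          rw [vsFirst_cons, if_pos he]
          simp [he]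
          omega
        · rw [vsFirst_cons, if_neg he]
          simp [he]
      rw [hstep]
      have hq'' : (q'.filter (fun x => decide (vsKey x.2 ≠ vsKey p.2))).length ≤ n :=
        le_trans (List.length_filter_le _ _) hq1
      have hp'' : (q'.filter (fun x => decide (vsKey x.2 ≠ vsKey p.2))).Pairwise
          (fun a b => a.1 < b.1) :=
        ((List.pairwise_cons.mp hp).2).sublist List.filter_sublist
      have : ∀ x ∈ q'.filter (fun x => decide (vsKey x.2 ≠ vsKey p.2)),
          decide ((vsFirst q').getD (vsKey x.2) (-1) = x.1)
            = decide ((vsFirst (q'.filter (fun x => decide (vsKey x.2 ≠ vsKey p.2)))).getD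
                (vsKey x.2) (-1) = x.1) := by
        intro x hx
        have hne : vsKey x.2 ≠ vsKey p.2 := by simpa using List.of_mem_filter hx
        rw [vsFirst_filter_ne _ _ _ _ hne]
      rw [List.filter_congr this, ih _ hq'' hp'', dedupNS_cons]

-- dedupNS commutes with a key-preserving map
lemma dedupNS_map (g : (Int × (List (String × String))) -> ((List (String × String)) × Int))
    (hg : ∀ x, PySem.List.sorted2 (g x).1 Prod.fst Prod.snd = vsKey x.2) :
    ∀ (n : Nat) (q : List (Int × (List (String × String)))), q.length ≤ n →
      dedupNS (fun p => PySem.List.sorted2 p.1 Prod.fst Prod.snd) (q.map g)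
        = (dedupNS (fun p => vsKey p.2) q).map g := by
  intro n
  induction n with
  | zero =>
    intro q hq
    rw [Nat.le_zero, List.length_eq_zero_iff] at hq
    subst hq
    simp [dedupNS_nil]
  | succ n ih =>
    intro q hq
    cases q with
    | nil => simp [dedupNS_nil]
    | cons p q' =>
      have hq1 : q'.length ≤ n := by simpa using hq
      rw [List.map_cons, dedupNS_cons, dedupNS_cons, List.map_cons]
      congr 1
      rw [List.filter_map]
      have hpt : ((fun x => decide (PySem.List.sorted2 x.1 Prod.fst Prod.snd
              ≠ PySem.List.sorted2 (g p).1 Prod.fst Prod.snd)) ∘ g)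
          = (fun x => decide (vsKey x.2 ≠ vsKey p.2)) := by
        funext x; simp [Function.comp, hg]
      rw [hpt, ih _ (le_trans (List.length_filter_le _ _) hq1)]

-- Source B's kept entries, mapped to (schedule, weight), are exactly the filtered zip
lemma kept_map_eq (suggestion_lst : List (List (String × String))) (weight_lst : List Int)
    (num_invitee : Int) :
    (((PySem.List.enumerate
          (PySem.List.slice suggestion_lst none (some (weight_lst.length : Int))) 0).filter
        (fun p => decide ((p.2.length : Int) = num_invitee))).map
      (fun p => (p.2, PySem.List.pyGetD weight_lst p.1 0)))
    = (suggestion_lst.zip weight_lst).filter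
        (fun p => decide ((p.1.length : Int) = num_invitee)) := by
  rw [PySem.List.slice_to_natCast]
  have hmap : ((PySem.List.enumerate (suggestion_lst.take weight_lst.length) 0).map
        (fun p => (p.2, PySem.List.pyGetD weight_lst p.1 0)))
      = suggestion_lst.zip weight_lst := by
    apply List.ext_getElem
    · simp [PySem.List.length_enumerate, List.length_zip]
      omega
    · intro i h1 h2
      have hi : i < (suggestion_lst.take weight_lst.length).length := by
        simpa [PySem.List.length_enumerate] using h1
      have hiw : i < weight_lst.length := by simp at hi; omega
      simp only [List.getElem_map, PySem.List.getElem_enumerate, List.getElem_zip]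
      have : PySem.List.pyGetD weight_lst ((0 : Int) + (i : Nat)) 0 = weight_lst[i] := by
        rw [zero_add, PySem.List.pyGetD_natCast]
        simp [hiw]
      rw [this]
      congr 1
      rw [List.getElem_take]
  calc (((PySem.List.enumerate (suggestion_lst.take weight_lst.length) 0).filter
        (fun p => decide ((p.2.length : Int) = num_invitee))).map
      (fun p => (p.2, PySem.List.pyGetD weight_lst p.1 0)))
      = (((PySem.List.enumerate (suggestion_lst.take weight_lst.length) 0).map
          (fun p => (p.2, PySem.List.pyGetD weight_lst p.1 0))).filter
        (fun p => decide ((p.1.length : Int) = num_invitee))) := by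
        rw [List.filter_map]
        exact congrArg _ (List.filter_congr (fun x _ => rfl))
    _ = _ := by rw [hmap]

-- ===== VERDICT (by name: the statement is the Claim_ definition above) =====
theorem valid_schedules_spec : Claim_equal_valid_schedules := by
  intro suggestion_lst weight_lst num_invitee _ hpre
  unfold Spec_valid_schedules valid_schedules valid_schedules_alt
  rw [filter_phase_eq suggestion_lst weight_lst num_invitee hpre]
  simp only [List.zip_map']
  rw [show (((suggestion_lst.zip weight_lst).filter
        (fun p => decide ((p.1.length : Int) = num_invitee))).map (fun a => (a.1, a.2)))
      = ((suggestion_lst.zip weight_lst).filter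
        (fun p => decide ((p.1.length : Int) = num_invitee))) from by simp,
      fold_set_eq_goDedup _ PySem.Set.empty [] []
        (by intro k; simp [PySem.Set.contains, PySem.Set.empty]),
      goDedup_eq_dedupNS]
  rw [show ((suggestion_lst.zip weight_lst).filter
        (fun p => decide ((p.1.length : Int) = num_invitee))).filter
        (fun p => decide (PySem.List.sorted2 p.1 Prod.fst Prod.snd ∉ ([] : List _)))
      = ((suggestion_lst.zip weight_lst).filter
        (fun p => decide ((p.1.length : Int) = num_invitee))) from by
        apply List.filter_eq_self.mpr; intro a _; simp]
  rw [filter_first_eq_dedupNS _ _ (le_refl _)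
        (List.Pairwise.sublist List.filter_sublist (PySem.List.pairwise_lt_enumerate _ _)),
      ← dedupNS_map (fun p => (p.2, PySem.List.pyGetD weight_lst p.1 0)) (fun x => rfl)
        _ _ (le_refl _),
      kept_map_eq]
  simp
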